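-- pv_equiv track=rewrite | github.com/larrytzhang/hex-analytics-bot | src/hex/viz/validators.py | to_column_oriented
-- ===== SOURCE A (Python) =====
-- from typing import Any
--
-- def to_column_oriented(data: list[dict[str, Any]]) -> dict[str, list[Any]]:
--     """Convert row-oriented dicts to column-oriented format.
--
--     Transforms [{col1: v1, col2: v2}, ...] into {col1: [v1, ...], col2: [v2, ...]}.
--
--     Args:
--         data: Row-oriented list of dicts.
--
--     Returns:
--         Dict mapping column names to lists of values.
--     """
--     if not data:
--         return {}
--
--     columns: dict[str, list[Any]] = {key: [] for key in data[0].keys()}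
--     for row in data:
--         for key, value in row.items():
--             if key in columns:
--                 columns[key].append(value)
--
--     return columns
-- ===== SOURCE B (Python) =====
-- from typing import Any
--
-- def to_column_oriented(data: list[dict[str, Any]]) -> dict[str, list[Any]]:
--     """Column-major rewrite: gather each first-row column across all rows."""
--     if not data:
--         return {}
--     return {key: [row[key] for row in data if key in row] for key in data[0].keys()}
-- ===== Notes on version B (the rewrite author's own statement) =====
-- stated objective: simpler
-- what changed: B replaces A's row-major loop that mutates per-column accumulator lists with a single column-major dict comprehension: for each first-row key it gathers [row[key] for row in data if key in row] across the rows.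
import Mathlib
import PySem

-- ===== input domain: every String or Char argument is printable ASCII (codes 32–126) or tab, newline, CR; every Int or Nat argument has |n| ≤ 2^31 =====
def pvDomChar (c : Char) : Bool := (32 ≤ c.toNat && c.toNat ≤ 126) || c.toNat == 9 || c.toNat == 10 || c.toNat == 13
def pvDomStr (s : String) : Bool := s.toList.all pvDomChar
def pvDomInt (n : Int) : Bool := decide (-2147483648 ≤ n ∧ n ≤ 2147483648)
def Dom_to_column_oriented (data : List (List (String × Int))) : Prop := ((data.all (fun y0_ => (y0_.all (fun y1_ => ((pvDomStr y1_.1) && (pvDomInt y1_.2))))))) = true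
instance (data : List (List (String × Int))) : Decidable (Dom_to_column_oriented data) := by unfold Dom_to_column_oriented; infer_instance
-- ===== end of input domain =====

-- B is a column-major one-liner instead of A's row-major accumulator loop; same values, simpler code.

-- ===== PORT A =====
-- rows (Python dicts) are interpreted via PySem.Dict.ofList; columns is a PySem.Dict built row by row
def to_column_oriented (data : List (List (String × Int))) : List (String × List Int) :=
  match data with
  | [] => []                                      -- if not data: return {}
  | r0 :: _ =>
    -- columns = {key: [] for key in data[0].keys()}
    let columns0 : PySem.Dict String (List Int) :=
      (PySem.Dict.ofList r0).keys.foldl (fun d k => d.insert k ([] : List Int)) PySem.Dict.empty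
    -- for row in data: for key, value in row.items(): if key in columns: columns[key].append(value)
    let columns := data.foldl (fun cols row =>
      (PySem.Dict.ofList row).items.foldl (fun cols p =>
        if cols.contains p.1 then cols.modify p.1 [] (fun l => l ++ [p.2]) else cols) cols) columns0
    columns.items

-- ===== PORT B =====
-- {key: [row[key] for row in data if key in row] for key in data[0].keys()}
def to_column_oriented_alt (data : List (List (String × Int))) : List (String × List Int) :=
  match data with
  | [] => []
  | r0 :: _ =>
    (PySem.Dict.ofList r0).keys.map (fun k =>
      (k, data.filterMap (fun row => (PySem.Dict.ofList row).get? k)))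

-- ===== PRECONDITION & SPEC =====
def Spec_to_column_oriented (data : List (List (String × Int))) (out : List (String × List Int)) : Prop := out = to_column_oriented_alt data
instance (data : List (List (String × Int))) (out : List (String × List Int)) : Decidable (Spec_to_column_oriented data out) := by unfold Spec_to_column_oriented; infer_instance

-- ===== CLAIM (what is proved, stated in full; the proofs are below) =====
def Claim_equal_to_column_oriented : Prop := ∀ (data : List (List (String × Int))), Dom_to_column_oriented data → Spec_to_column_oriented data (to_column_oriented data)

-- ===== LEMMAS AND PROOFS =====

-- the inner loop body of A
def pvStep (cols : PySem.Dict String (List Int)) (p : String × Int) : PySem.Dict String (List Int) :=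
  if cols.contains p.1 then cols.modify p.1 [] (fun l => l ++ [p.2]) else cols

lemma pvStep_keys (cols : PySem.Dict String (List Int)) (p : String × Int) :
    (pvStep cols p).keys = cols.keys := by
  unfold pvStep
  split_ifs with h
  · rw [PySem.Dict.keys_modify, PySem.Dict.keys_insert_of_contains]
    exact h
  · rfl

lemma pvInner_keys (l : List (String × Int)) (cols : PySem.Dict String (List Int)) :
    (l.foldl pvStep cols).keys = cols.keys := by
  induction l generalizing cols with
  | nil => rfl
  | cons p l ih => simp [List.foldl_cons, ih, pvStep_keys]

lemma pvOuter_keys (rows : List (List (String × Int))) (cols : PySem.Dict String (List Int)) :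
    (rows.foldl (fun c row => (PySem.Dict.ofList row).items.foldl pvStep c) cols).keys = cols.keys := by
  induction rows generalizing cols with
  | nil => rfl
  | cons r rows ih => simp [List.foldl_cons, ih, pvInner_keys]

lemma pvInner_getD (l : List (String × Int)) (cols : PySem.Dict String (List Int)) (k : String)
    (hc : cols.contains k = true) :
    (l.foldl pvStep cols).getD k [] =
      cols.getD k [] ++ (l.filter (fun p => p.1 == k)).map (·.2) := by
  induction l generalizing cols with
  | nil => simp
  | cons p l ih =>
    rcases p with ⟨a, b⟩
    by_cases hak : a = k
    · subst hak
      have hstep : pvStep cols (a, b) = cols.modify a [] (fun l => l ++ [b]) := by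
        unfold pvStep; simp [hc]
      have hc' : (cols.modify a [] (fun l => l ++ [b])).contains a = true := by
        rw [PySem.Dict.contains_modify]; simp
      simp only [List.foldl_cons, hstep]
      rw [ih _ hc']
      rw [PySem.Dict.getD_modify_self]
      simp [List.append_assoc]
    · have hcols' : pvStep cols (a, b) = cols ∨
          pvStep cols (a, b) = cols.modify a [] (fun l => l ++ [b]) := by
        unfold pvStep; split_ifs <;> simp
      have hkeys : (pvStep cols (a, b)).keys = cols.keys := pvStep_keys cols (a, b)
      have hc' : (pvStep cols (a, b)).contains k = true := by
        rw [PySem.Dict.contains_iff_mem_keys, hkeys, ← PySem.Dict.contains_iff_mem_keys]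
        exact hc
      have hgd : (pvStep cols (a, b)).getD k [] = cols.getD k [] := by
        rcases hcols' with h | h
        · rw [h]
        · rw [h, PySem.Dict.getD_modify_of_ne _ _ _ (fun h' => hak h'.symm)]
      simp only [List.foldl_cons]
      rw [ih _ hc', hgd]
      simp [hak]

lemma pv_filter_nil_of_not_mem {ν : Type} (l : List (String × ν)) (k : String)
    (h : k ∉ l.map Prod.fst) : l.filter (fun p => p.1 == k) = [] := by
  rw [List.filter_eq_nil_iff]
  intro p hp hpk
  exact h (List.mem_map.mpr ⟨p, hp, by simpa using hpk⟩)

-- on a nodup-key association list, filtering for k and projecting gives exactly the dict lookup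
lemma pv_filter_eq_get? {ν : Type} (l : List (String × ν)) (k : String)
    (hnd : (l.map Prod.fst).Nodup) :
    (l.filter (fun p => p.1 == k)).map (·.2) = ((PySem.Dict.mk l).get? k).toList := by
  induction l with
  | nil => simp [PySem.Dict.get?]
  | cons p l ih =>
    rcases p with ⟨a, b⟩
    rw [PySem.Dict.get?_mk_cons]
    simp only [List.map_cons, List.nodup_cons] at hnd
    by_cases hak : a = k
    · subst hak
      rw [List.filter_cons_of_pos (by simp)]
      rw [pv_filter_nil_of_not_mem l a hnd.1]
      simp
    · rw [List.filter_cons_of_neg (by simpa using hak)]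
      rw [ih hnd.2]
      simp [hak]

lemma pv_items_filter_eq_get? {ν : Type} (d : PySem.Dict String ν) (k : String)
    (hnd : d.keys.Nodup) :
    (d.items.filter (fun p => p.1 == k)).map (·.2) = (d.get? k).toList := by
  have := pv_filter_eq_get? d.items k hnd
  simpa using this

lemma pvOuter_getD (rows : List (List (String × Int))) (cols : PySem.Dict String (List Int))
    (k : String) (hc : cols.contains k = true) :
    (rows.foldl (fun c row => (PySem.Dict.ofList row).items.foldl pvStep c) cols).getD k [] =
      cols.getD k [] ++ rows.filterMap (fun row => (PySem.Dict.ofList row).get? k) := by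
  induction rows generalizing cols with
  | nil => simp
  | cons r rows ih =>
    have hc' : ((PySem.Dict.ofList r).items.foldl pvStep cols).contains k = true := by
      rw [PySem.Dict.contains_iff_mem_keys, pvInner_keys, ← PySem.Dict.contains_iff_mem_keys]
      exact hc
    simp only [List.foldl_cons]
    rw [ih _ hc', pvInner_getD _ _ _ hc,
      pv_items_filter_eq_get? (PySem.Dict.ofList r) k (PySem.Dict.nodup_keys_ofList r)]
    cases h : (PySem.Dict.ofList r).get? k <;>
      simp [h, List.append_assoc]

-- the initial dict {key: [] for key in K}
lemma pv_init_items (K : List String) (hnd : K.Nodup) :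
    (K.foldl (fun d k => d.insert k ([] : List Int)) PySem.Dict.empty).items =
      K.map (fun k => (k, ([] : List Int))) := by
  have := PySem.Dict.items_foldl_insert_fresh K (fun k => k) (fun _ => ([] : List Int))
    PySem.Dict.empty (by intro a _; simp) (by simpa using hnd)
  simpa using this

theorem pv_main (data : List (List (String × Int))) :
    to_column_oriented data = to_column_oriented_alt data := by
  match data with
  | [] => rfl
  | r0 :: rest =>
    unfold to_column_oriented to_column_oriented_alt
    simp only
    set K := (PySem.Dict.ofList r0).keys with hK
    have hndK : K.Nodup := PySem.Dict.nodup_keys_ofList r0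
    set cols0 : PySem.Dict String (List Int) :=
      K.foldl (fun d k => d.insert k ([] : List Int)) PySem.Dict.empty with hcols0
    have hitems0 : cols0.items = K.map (fun k => (k, ([] : List Int))) := pv_init_items K hndK
    have hkeys0 : cols0.keys = K := by
      simp [PySem.Dict.keys, hitems0, Function.comp_def]
    set cols := (r0 :: rest).foldl
        (fun c row => (PySem.Dict.ofList row).items.foldl pvStep c) cols0 with hcols
    have hkeys : cols.keys = K := by rw [hcols, pvOuter_keys, hkeys0]
    have hnd : cols.keys.Nodup := by rw [hkeys]; exact hndK
    have hstepeq : (fun (c : PySem.Dict String (List Int)) (row : List (String × Int)) =>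
        (PySem.Dict.ofList row).items.foldl (fun cols p =>
          if cols.contains p.1 then cols.modify p.1 [] (fun l => l ++ [p.2]) else cols) c) =
        (fun c row => (PySem.Dict.ofList row).items.foldl pvStep c) := rfl
    rw [hstepeq]
    rw [← hcols, PySem.Dict.items_eq_map_keys cols hnd [], hkeys]
    apply List.map_congr_left
    intro k hk
    have hc0 : cols0.contains k = true := by
      rw [PySem.Dict.contains_iff_mem_keys, hkeys0]; exact hk
    have hgd0 : cols0.getD k [] = [] := by
      refine PySem.Dict.getD_of_mem_items cols0 ?_ (by rw [hkeys0]; exact hndK) []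
      rw [hitems0]
      exact List.mem_map.mpr ⟨k, hk, rfl⟩
    have := pvOuter_getD (r0 :: rest) cols0 k hc0
    rw [hcols, this, hgd0]
    simp

-- ===== VERDICT (by name: the statement is the Claim_ definition above) =====
theorem to_column_oriented_spec : Claim_equal_to_column_oriented := by
  intro data _
  exact pv_main data
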